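-- pv_equiv track=rewrite | github.com/hao-ai-lab/FastVideo | fastvideo/layers/quantization/gguf.py | is_layer_skipped_gguf
-- ===== SOURCE A (Python) =====
-- from collections.abc import Callable, Mapping
-- from types import MappingProxyType
--
-- def is_layer_skipped_gguf(
--     prefix: str,
--     unquantized_modules: list[str],
--     fused_mapping: Mapping[str, list[str]] = MappingProxyType({}),
-- ):
--     proj_name = prefix.split(".")[-1]
--     if proj_name in fused_mapping:
--         shard_prefixes = [
--             prefix.replace(proj_name, shard_proj_name)
--             for shard_proj_name in fused_mapping[proj_name]
--         ]
--         is_skipped = None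
--         for shard_prefix in shard_prefixes:
--             is_shard_skipped = any(
--                 shard_prefix in module_name
--                 for module_name in unquantized_modules
--             )
--             if is_skipped is None:
--                 is_skipped = is_shard_skipped
--             elif is_shard_skipped != is_skipped:
--                 raise ValueError(
--                     f"Detected some but not all shards of {prefix} "
--                     "are quantized. All shards of fused layers "
--                     "to have the same precision."
--                 )
--     else:
--         is_skipped = any(
--             module_name in prefix for module_name in unquantized_modules
--         )
--     assert is_skipped is not None
--     return is_skipped
-- ===== SOURCE B (Python) =====
-- from collections.abc import Mapping
--
-- def is_layer_skipped_gguf(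
--     prefix: str,
--     unquantized_modules: list[str],
--     fused_mapping: Mapping[str, list[str]] = {},
-- ):
--     proj_name = prefix.split(".")[-1]
--     if proj_name not in fused_mapping:
--         return any(m in prefix for m in unquantized_modules)
--     shard_prefixes = {
--         prefix.replace(proj_name, sp) for sp in fused_mapping[proj_name]
--     }
--     assert shard_prefixes
--     # one scan over the modules, collecting which shard prefixes are hit
--     hit = {sp for m in unquantized_modules for sp in shard_prefixes if sp in m}
--     if hit and hit != shard_prefixes:
--         raise ValueError(
--             f"Detected some but not all shards of {prefix} "
--             "are quantized. All shards of fused layers "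
--             "to have the same precision."
--         )
--     return bool(hit)
-- ===== Notes on version B (the rewrite author's own statement) =====
-- stated objective: alternative
-- what changed: The fused branch no longer computes a per-shard verdict list with a stateful accumulator: B inverts the loop nesting, scanning unquantized_modules once and collecting the SET of shard prefixes that occur in some module, then decides by set comparison (raise iff the hit set is nonempty but not equal to the shard-prefix set, return 'hit nonempty'); the non-fused branch is unchanged. Pre_ excludes inputs where A raises: a fused shard list with disagreeing shard verdicts (ValueError) or an empty fused shard list (AssertionError); B raises the same errors there.
import Mathlib
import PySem

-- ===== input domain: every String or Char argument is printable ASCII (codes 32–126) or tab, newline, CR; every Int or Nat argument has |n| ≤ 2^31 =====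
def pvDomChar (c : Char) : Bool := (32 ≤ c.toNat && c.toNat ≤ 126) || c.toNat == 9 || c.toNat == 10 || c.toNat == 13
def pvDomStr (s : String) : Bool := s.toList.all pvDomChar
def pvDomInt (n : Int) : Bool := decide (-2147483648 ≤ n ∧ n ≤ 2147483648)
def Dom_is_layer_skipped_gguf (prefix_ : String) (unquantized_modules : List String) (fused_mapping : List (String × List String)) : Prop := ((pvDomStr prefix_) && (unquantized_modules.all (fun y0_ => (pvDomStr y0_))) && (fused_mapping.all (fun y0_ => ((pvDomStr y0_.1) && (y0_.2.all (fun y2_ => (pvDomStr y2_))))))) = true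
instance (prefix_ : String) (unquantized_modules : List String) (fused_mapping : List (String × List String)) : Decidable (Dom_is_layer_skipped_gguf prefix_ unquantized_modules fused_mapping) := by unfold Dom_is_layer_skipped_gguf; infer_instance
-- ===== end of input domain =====

-- B inverts the fused-branch loop nesting: one scan over unquantized_modules collects
-- the SET of shard prefixes hit, decided by set comparison; same cost, different algorithm.
-- Return values agree on Pre_ (the inputs where A returns, i.e. does not raise).

-- ===== PORT A =====
-- A's fused-branch loop: state is `is_skipped` (None = Option.none).
-- Returns `none` when the loop raises ValueError (mismatching shard verdicts);
-- those inputs are excluded by Pre_.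
def pvALoop (unquantized_modules : List String) : List String → Option Bool → Option Bool
  | [], st => st
  | sp :: rest, st =>
    let is_shard_skipped := unquantized_modules.any (fun m => PySem.Str.isIn sp m)
    match st with
    | none => pvALoop unquantized_modules rest (some is_shard_skipped)
    | some b =>
      if is_shard_skipped ≠ b then none  -- raise ValueError (outside Pre_)
      else pvALoop unquantized_modules rest (some b)

def is_layer_skipped_gguf (prefix_ : String) (unquantized_modules : List String) (fused_mapping : List (String × List String)) : Bool :=
  -- proj_name = prefix.split(".")[-1]: split? with sep "." is never none and never empty,
  -- so the getD/getLastD defaults are unreachable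
  if (PySem.Dict.mk fused_mapping).contains (((PySem.Str.split? prefix_ ".").getD []).getLastD "") then
    -- the final `assert is_skipped is not None` fails when the loop state stays none
    -- (empty shard list) and the ValueError case also yields none: both outside Pre_
    (pvALoop unquantized_modules
      (((PySem.Dict.mk fused_mapping).getD (((PySem.Str.split? prefix_ ".").getD []).getLastD "") []).map
        (fun sp => PySem.Str.replace prefix_ (((PySem.Str.split? prefix_ ".").getD []).getLastD "") sp))
      none).getD false
  else
    unquantized_modules.any (fun m => PySem.Str.isIn m prefix_)

-- ===== PORT B =====
-- hit = {sp for m in unquantized_modules for sp in shard_prefixes if sp in m}: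
-- a single fold over the modules, inner fold over the shard-prefix set
def pvHitSet (sps : PySem.Set String) (unquantized_modules : List String) : PySem.Set String :=
  unquantized_modules.foldl
    (fun acc m => sps.foldl (fun a sp => if PySem.Str.isIn sp m then PySem.Set.add a sp else a) acc)
    PySem.Set.empty

def is_layer_skipped_gguf_alt (prefix_ : String) (unquantized_modules : List String) (fused_mapping : List (String × List String)) : Bool :=
  let proj := ((PySem.Str.split? prefix_ ".").getD []).getLastD ""
  match (PySem.Dict.mk fused_mapping).get? proj with
  | none => unquantized_modules.any (fun m => PySem.Str.isIn m prefix_)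
  | some shards =>
    let sps : PySem.Set String := PySem.Set.ofList (shards.map (fun sp => PySem.Str.replace prefix_ proj sp))
    if sps.isEmpty then false  -- `assert shard_prefixes` fails (outside Pre_)
    else
      let hit := pvHitSet sps unquantized_modules
      if !hit.isEmpty && !(PySem.Set.equal hit sps) then false  -- raise ValueError (outside Pre_)
      else !hit.isEmpty  -- bool(hit)

-- ===== PRECONDITION & SPEC =====
-- Pre_ excludes exactly the inputs where A raises: when the last dot-component of
-- prefix_ is a key of the mapping, its shard list must be nonempty (else the final
-- assert fails) and all shard verdicts must agree (else ValueError).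
def Pre_is_layer_skipped_gguf (prefix_ : String) (unquantized_modules : List String) (fused_mapping : List (String × List String)) : Prop :=
  (match (PySem.Dict.mk fused_mapping).get? (((PySem.Str.split? prefix_ ".").getD []).getLastD "") with
   | some shards =>
     !shards.isEmpty &&
     shards.all (fun s =>
       (unquantized_modules.any (fun m =>
          PySem.Str.isIn (PySem.Str.replace prefix_ (((PySem.Str.split? prefix_ ".").getD []).getLastD "") s) m))
       == (unquantized_modules.any (fun m =>
          PySem.Str.isIn (PySem.Str.replace prefix_ (((PySem.Str.split? prefix_ ".").getD []).getLastD "") (shards.headD "")) m)))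
   | none => true) = true
instance (prefix_ : String) (unquantized_modules : List String) (fused_mapping : List (String × List String)) : Decidable (Pre_is_layer_skipped_gguf prefix_ unquantized_modules fused_mapping) := by unfold Pre_is_layer_skipped_gguf; infer_instance

def pvWitness_is_layer_skipped_gguf : String × List String × (List (String × List String)) :=
  ("model.q_proj", ["model.q", "model.k"], [("q_proj", ["q", "k"])])

def Spec_is_layer_skipped_gguf (prefix_ : String) (unquantized_modules : List String) (fused_mapping : List (String × List String)) (out : Bool) : Prop := out = is_layer_skipped_gguf_alt prefix_ unquantized_modules fused_mapping
instance (prefix_ : String) (unquantized_modules : List String) (fused_mapping : List (String × List String)) (out : Bool) : Decidable (Spec_is_layer_skipped_gguf prefix_ unquantized_modules fused_mapping out) := by unfold Spec_is_layer_skipped_gguf; infer_instance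

-- ===== CLAIM =====
def Claim_equal_is_layer_skipped_gguf : Prop := ∀ (prefix_ : String) (unquantized_modules : List String) (fused_mapping : List (String × List String)), Dom_is_layer_skipped_gguf prefix_ unquantized_modules fused_mapping → Pre_is_layer_skipped_gguf prefix_ unquantized_modules fused_mapping → Spec_is_layer_skipped_gguf prefix_ unquantized_modules fused_mapping (is_layer_skipped_gguf prefix_ unquantized_modules fused_mapping)

-- ===== LEMMAS AND PROOFS =====

-- A's loop, when every remaining shard verdict equals the accumulated one, keeps it.
theorem pvALoop_const (unq : List String) (xs : List String) (b : Bool)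
    (h : ∀ x ∈ xs, unq.any (fun m => PySem.Str.isIn x m) = b) :
    pvALoop unq xs (some b) = some b := by
  induction xs with
  | nil => rfl
  | cons x rest ih =>
    have hx := h x (by simp)
    simp only [pvALoop, hx, ne_eq, not_true_eq_false, if_false]
    exact ih (fun y hy => h y (List.mem_cons_of_mem _ hy))

-- membership in the inner fold of pvHitSet
theorem mem_innerFold (m : String) (sps : List String) (acc : PySem.Set String) (y : String) :
    y ∈ sps.foldl (fun a sp => if PySem.Str.isIn sp m then PySem.Set.add a sp else a) acc ↔
      y ∈ acc ∨ (y ∈ sps ∧ PySem.Str.isIn y m = true) := by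
  induction sps generalizing acc with
  | nil => simp
  | cons sp rest ih =>
    simp only [List.foldl_cons, ih]
    by_cases h : PySem.Str.isIn sp m = true
    · simp only [h, if_true, PySem.Set.mem_add, List.mem_cons]
      constructor
      · rintro ((hy | rfl) | ⟨hy, hm⟩)
        · exact Or.inl hy
        · exact Or.inr ⟨Or.inl rfl, h⟩
        · exact Or.inr ⟨Or.inr hy, hm⟩
      · rintro (hy | ⟨(rfl | hy), hm⟩)
        · exact Or.inl (Or.inl hy)
        · exact Or.inl (Or.inr rfl)
        · exact Or.inr ⟨hy, hm⟩
    · simp only [h, List.mem_cons]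
      constructor
      · rintro (hy | ⟨hy, hm⟩)
        · exact Or.inl hy
        · exact Or.inr ⟨Or.inr hy, hm⟩
      · rintro (hy | ⟨(rfl | hy), hm⟩)
        · exact Or.inl hy
        · exact absurd hm h
        · exact Or.inr ⟨hy, hm⟩

-- membership in the hit set: exactly the shard prefixes contained in some module
theorem mem_pvHitSet (sps : PySem.Set String) (unq : List String) (y : String) :
    y ∈ pvHitSet sps unq ↔ y ∈ sps ∧ ∃ m ∈ unq, PySem.Str.isIn y m = true := by
  unfold pvHitSet
  suffices h : ∀ (acc : PySem.Set String),
      y ∈ unq.foldl (fun acc m => sps.foldl (fun a sp => if PySem.Str.isIn sp m then PySem.Set.add a sp else a) acc) acc ↔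
        y ∈ acc ∨ (y ∈ sps ∧ ∃ m ∈ unq, PySem.Str.isIn y m = true) by
    rw [h PySem.Set.empty]; simp [PySem.Set.empty]
  induction unq with
  | nil => simp
  | cons m rest ih =>
    intro acc
    simp only [List.foldl_cons, ih, mem_innerFold]
    constructor
    · rintro ((hy | ⟨hy, hm⟩) | ⟨hy, m', hm', hin⟩)
      · exact Or.inl hy
      · exact Or.inr ⟨hy, m, by simp, hm⟩
      · exact Or.inr ⟨hy, m', List.mem_cons_of_mem _ hm', hin⟩
    · rintro (hy | ⟨hy, m', hm', hin⟩)
      · exact Or.inl (Or.inl hy)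
      · rcases List.mem_cons.mp hm' with rfl | hm'
        · exact Or.inl (Or.inr ⟨hy, hin⟩)
        · exact Or.inr ⟨hy, m', hm', hin⟩

-- ===== VERDICT =====
theorem is_layer_skipped_gguf_spec : Claim_equal_is_layer_skipped_gguf := by
  intro prefix_ unq fm _hdom hpre
  unfold Spec_is_layer_skipped_gguf
  unfold is_layer_skipped_gguf is_layer_skipped_gguf_alt
  unfold Pre_is_layer_skipped_gguf at hpre
  rw [PySem.Dict.contains_eq_isSome_get?]
  generalize hproj : ((PySem.Str.split? prefix_ ".").getD []).getLastD "" = proj at *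
  cases hget : (PySem.Dict.mk fm).get? proj with
  | none => simp [hget]
  | some shards =>
    rw [hget] at hpre
    simp only [hget, Option.isSome_some, if_true]
    rw [PySem.Dict.getD_eq_get?_getD, hget, Option.getD_some]
    cases shards with
    | nil => simp at hpre
    | cons s0 rest =>
      simp only [Bool.and_eq_true, List.all_cons, List.all_eq_true, beq_iff_eq,
        List.headD_cons] at hpre
      obtain ⟨-, -, hall⟩ := hpre
      have hall' : ∀ s ∈ s0 :: rest,
          (unq.any fun m => PySem.Str.isIn (PySem.Str.replace prefix_ proj s) m)
          = (unq.any fun m => PySem.Str.isIn (PySem.Str.replace prefix_ proj s0) m) := by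
        intro s hs
        rcases List.mem_cons.mp hs with h | h
        · subst h; rfl
        · exact hall s h
      set b := (unq.any fun m => PySem.Str.isIn (PySem.Str.replace prefix_ proj s0) m) with hb
      have hverdict : ∀ x ∈ (s0 :: rest).map (fun sp => PySem.Str.replace prefix_ proj sp),
          (unq.any fun m => PySem.Str.isIn x m) = b := by
        intro x hx
        obtain ⟨s, hs, rfl⟩ := List.mem_map.mp hx
        exact hall' s hs
      -- A side: the loop keeps the constant verdict b
      have hAside : pvALoop unq ((s0 :: rest).map (fun sp => PySem.Str.replace prefix_ proj sp)) none
          = some b := by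
        rw [List.map_cons, pvALoop]
        simp only [← hb]
        exact pvALoop_const unq _ b
          (fun x hx => hverdict x (by rw [List.map_cons]; exact List.mem_cons_of_mem _ hx))
      rw [hAside, Option.getD_some]
      -- B side
      set sps : PySem.Set String :=
        PySem.Set.ofList ((s0 :: rest).map (fun sp => PySem.Str.replace prefix_ proj sp)) with hsps
      have hmem_sps : ∀ y, y ∈ sps ↔ y ∈ (s0 :: rest).map (fun sp => PySem.Str.replace prefix_ proj sp) := by
        intro y; rw [hsps]; exact PySem.Set.mem_ofList (xs := (s0 :: rest).map (fun sp => PySem.Str.replace prefix_ proj sp)) (y := y)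
      have hspsne : sps.isEmpty = false := by
        rw [hsps, List.map_cons, PySem.Set.ofList_cons]; rfl
      rw [hspsne]
      simp only [Bool.false_eq_true, if_false]
      set hit := pvHitSet sps unq with hhit
      have hmem_hit : ∀ y, y ∈ hit ↔ y ∈ sps ∧ ∃ m ∈ unq, PySem.Str.isIn y m = true := by
        intro y; rw [hhit]; exact mem_pvHitSet sps unq y
      cases hb' : b with
      | false =>
        have hempty : hit = [] := by
          apply List.eq_nil_iff_forall_not_mem.mpr
          intro y hy
          obtain ⟨hy1, m, hm, hin⟩ := (hmem_hit y).mp hy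
          have hv : (unq.any fun m => PySem.Str.isIn y m) = b := hverdict y ((hmem_sps y).mp hy1)
          rw [hb'] at hv
          have : (unq.any fun m => PySem.Str.isIn y m) = true := List.any_eq_true.mpr ⟨m, hm, hin⟩
          rw [hv] at this
          exact Bool.false_ne_true this
        rw [hempty]
        rfl
      | true =>
        have hv0 : (unq.any fun m => PySem.Str.isIn (PySem.Str.replace prefix_ proj s0) m) = true := by
          rw [← hb]; exact hb'
        have hi0 : PySem.Str.replace prefix_ proj s0 ∈ hit := by
          rw [hmem_hit]
          refine ⟨(hmem_sps _).mpr (by simp), ?_⟩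
          obtain ⟨m, hm, hin⟩ := List.any_eq_true.mp hv0
          exact ⟨m, hm, hin⟩
        have hne : hit.isEmpty = false := by
          cases h : hit.isEmpty
          · rfl
          · rw [List.isEmpty_iff.mp h] at hi0
            exact absurd hi0 (List.not_mem_nil)
        have heq : PySem.Set.equal hit sps = true := by
          rw [PySem.Set.equal_iff]
          intro y
          constructor
          · intro hy
            exact ((hmem_hit y).mp hy).1
          · intro hy
            rw [hmem_hit]
            refine ⟨hy, ?_⟩
            have hvy : (unq.any fun m => PySem.Str.isIn y m) = true := by
              rw [hverdict y ((hmem_sps y).mp hy), hb']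
            obtain ⟨m, hm, hin⟩ := List.any_eq_true.mp hvy
            exact ⟨m, hm, hin⟩
        rw [hne, heq]
        rfl
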